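-- pv_equiv track=rewrite | github.com/Ozgurooozer/P_Q_tum | experiments/qse_v6_theory_proof.py | theory_count
-- ===== SOURCE A (Python) =====
-- from math import comb, factorial
--
-- def theory_count(h, v):
--     """
--     Kaç pozisyon düzenlemesi VNE=v verir, toplam H sayısı=h iken?
--
--     4 çift var. Her çift için durum:
--       p = her iki tarafta H (dolanıklık yok)
--       v = A=H, B≠H (dolanıklık var) ← bu VNE'yi belirliyor
--       r = A≠H, B=H (dolanıklık yok)
--       s = hiç H yok (dolanıklık yok)
--
--     Kısıtlamalar:
--       p + v + r + s = 4 (toplam çift)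
--       2p + v + r = h (toplam H)
--       p,v,r,s ≥ 0
--
--     Her (p,v,r,s) düzenlemesi multinomial(4; p,v,r,s) kadar pozisyon verir.
--     """
--     total = 0
--     # p üzerinden topla
--     for p in range(5):
--         r = h - v - 2*p
--         s = 4 - p - v - r
--         if r < 0 or s < 0:
--             continue
--         if p + v + r + s != 4:
--             continue
--         # Multinomial katsayısı
--         try:
--             m = factorial(4) // (factorial(p) * factorial(v) * factorial(r) * factorial(s))
--         except ValueError:
--             continue
--         total += m
--     return total
-- ===== SOURCE B (Python) =====
-- from itertools import product
--
-- def theory_count(h, v):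
--     """Count arrangements by brute-force enumeration of all 4**4 state
--     assignments of the 4 pairs (states 0=p, 1=v, 2=r, 3=s)."""
--     total = 0
--     for assign in product(range(4), repeat=4):
--         p = assign.count(0)
--         vc = assign.count(1)
--         r = assign.count(2)
--         if vc == v and 2 * p + vc + r == h:
--             total += 1
--     return total
-- ===== Notes on version B (the rewrite author's own statement) =====
-- stated objective: alternative
-- what changed: Replaces A's sum of multinomial coefficients over p (with factorial arithmetic and try/except) by a direct brute-force enumeration of all 4^4 state assignments of the 4 pairs, counting those whose v-state count equals v and whose H total equals h.
import Mathlib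
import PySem

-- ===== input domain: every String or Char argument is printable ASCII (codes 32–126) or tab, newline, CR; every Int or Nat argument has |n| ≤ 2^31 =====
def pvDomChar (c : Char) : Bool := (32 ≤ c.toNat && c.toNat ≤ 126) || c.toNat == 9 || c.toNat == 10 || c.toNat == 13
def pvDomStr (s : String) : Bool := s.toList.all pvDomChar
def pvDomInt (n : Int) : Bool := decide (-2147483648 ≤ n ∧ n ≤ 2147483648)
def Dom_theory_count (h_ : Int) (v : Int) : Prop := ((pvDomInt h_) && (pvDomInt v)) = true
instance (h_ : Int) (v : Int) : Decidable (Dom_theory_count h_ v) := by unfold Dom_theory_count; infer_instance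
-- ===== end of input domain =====

-- B replaces A's multinomial-coefficient sum over p by a direct enumeration of all 4^4
-- state assignments (objective: alternative decomposition, same exact values).

-- ===== PORT A =====
-- A loops p over range(5); factorial(v) raises ValueError exactly when v < 0, caught by
-- A's try/except and ported as the `v < 0` skip branch (r, s, p are ≥ 0 on that branch).
def pvAStep (h_ : Int) (v : Int) (total : Int) (p : Int) : Int :=
  let r := h_ - v - 2 * p
  let s := 4 - p - v - r
  if r < 0 ∨ s < 0 then total
  else if p + v + r + s ≠ 4 then total
  else if v < 0 then total  -- except ValueError: continue
  else total + PySem.Int.floordiv (Int.ofNat (Nat.factorial 4))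
      (Int.ofNat (Nat.factorial p.toNat * Nat.factorial v.toNat *
                  Nat.factorial r.toNat * Nat.factorial s.toNat))

def theory_count (h_ : Int) (v : Int) : Int :=
  (PySem.List.pyRange 0 5 1).foldl (pvAStep h_ v) 0

-- ===== PORT B =====
-- itertools.product(range(4), repeat=4)
def pvAssigns : List (Int × Int × Int × Int) :=
  (PySem.List.pyRange 0 4 1).flatMap fun a =>
  (PySem.List.pyRange 0 4 1).flatMap fun b =>
  (PySem.List.pyRange 0 4 1).flatMap fun c =>
  (PySem.List.pyRange 0 4 1).map fun d => (a, b, c, d)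

-- assign.count(x) for the 4-tuple
def pvTupCount (t : Int × Int × Int × Int) (x : Int) : Int :=
  (if t.1 = x then 1 else 0) + (if t.2.1 = x then 1 else 0) +
  (if t.2.2.1 = x then 1 else 0) + (if t.2.2.2 = x then 1 else 0)

def theory_count_alt (h_ : Int) (v : Int) : Int :=
  pvAssigns.foldl (fun total t =>
    let p := pvTupCount t 0
    let vc := pvTupCount t 1
    let r := pvTupCount t 2
    if vc = v ∧ 2 * p + vc + r = h_ then total + 1 else total) 0

-- ===== PRECONDITION & SPEC =====
def Spec_theory_count (h_ : Int) (v : Int) (out : Int) : Prop := out = theory_count_alt h_ v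
instance (h_ : Int) (v : Int) (out : Int) : Decidable (Spec_theory_count h_ v out) := by unfold Spec_theory_count; infer_instance

-- ===== CLAIM (what is proved, stated in full; the proofs are below) =====
def Claim_equal_theory_count : Prop := ∀ (h_ : Int) (v : Int), Dom_theory_count h_ v → Spec_theory_count h_ v (theory_count h_ v)

-- ===== LEMMAS AND PROOFS =====

-- B's loop adds nothing when the predicate fails on every assignment.
theorem pv_foldl_zero (h_ v : Int) (l : List (Int × Int × Int × Int)) (acc : Int)
    (hall : ∀ t ∈ l, ¬ (pvTupCount t 1 = v ∧ 2 * pvTupCount t 0 + pvTupCount t 1 + pvTupCount t 2 = h_)) :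
    l.foldl (fun total t =>
      let p := pvTupCount t 0
      let vc := pvTupCount t 1
      let r := pvTupCount t 2
      if vc = v ∧ 2 * p + vc + r = h_ then total + 1 else total) acc = acc := by
  induction l generalizing acc with
  | nil => rfl
  | cons t l ih =>
      simp only [List.foldl_cons]
      rw [if_neg (hall t (List.mem_cons_self))]
      exact ih acc (fun t' ht' => hall t' (List.mem_cons_of_mem _ ht'))

-- every assignment has its v-count in [0,4] and its H-total in [0,8]
set_option maxRecDepth 16384 in
theorem pv_bounds : ∀ t ∈ pvAssigns,
    0 ≤ pvTupCount t 1 ∧ pvTupCount t 1 ≤ 4 ∧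
    0 ≤ 2 * pvTupCount t 0 + pvTupCount t 1 + pvTupCount t 2 ∧
    2 * pvTupCount t 0 + pvTupCount t 1 + pvTupCount t 2 ≤ 8 := by decide

theorem pv_alt_out_of_range (h_ v : Int)
    (hout : v < 0 ∨ 4 < v ∨ h_ < 0 ∨ 8 < h_) : theory_count_alt h_ v = 0 := by
  unfold theory_count_alt
  refine pv_foldl_zero h_ v pvAssigns 0 (fun t ht hc => ?_)
  have hb := pv_bounds t ht
  omega

-- out of range, A's step always skips (for p ≥ 0)
theorem pvAStep_skip (h_ v : Int) (total p : Int)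
    (hout : v < 0 ∨ 4 < v ∨ h_ < 0 ∨ 8 < h_) (hp : 0 ≤ p) :
    pvAStep h_ v total p = total := by
  unfold pvAStep
  dsimp only
  split_ifs <;> first | rfl | (exfalso; omega)

theorem pv_a_out_of_range (h_ v : Int)
    (hout : v < 0 ∨ 4 < v ∨ h_ < 0 ∨ 8 < h_) : theory_count h_ v = 0 := by
  unfold theory_count
  rw [show PySem.List.pyRange 0 5 1 = [0, 1, 2, 3, 4] from by decide]
  simp only [List.foldl_cons, List.foldl_nil]
  repeat rw [pvAStep_skip h_ v _ _ hout (by norm_num)]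

set_option maxRecDepth 16384 in
theorem pv_in_range (h_ v : Int) (hv : 0 ≤ v ∧ v ≤ 4) (hh : 0 ≤ h_ ∧ h_ ≤ 8) :
    theory_count h_ v = theory_count_alt h_ v := by
  obtain ⟨hv0, hv4⟩ := hv
  obtain ⟨hh0, hh8⟩ := hh
  interval_cases h_ <;> interval_cases v <;> decide

-- ===== VERDICT (by name: the statement is the Claim_ definition above) =====
theorem theory_count_spec : Claim_equal_theory_count := by
  intro h_ v _
  unfold Spec_theory_count
  by_cases hcase : (0 ≤ v ∧ v ≤ 4) ∧ (0 ≤ h_ ∧ h_ ≤ 8)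
  · exact (pv_in_range h_ v hcase.1 hcase.2).symm ▸ rfl
  · rw [pv_a_out_of_range h_ v (by omega), pv_alt_out_of_range h_ v (by omega)]
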